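-- pv_equiv track=rewrite | github.com/p0ss/MenaceAssetPacker | tools/diff_schemas.py | diff_enums
-- ===== SOURCE A (Python) =====
-- def diff_enums(old_enums, new_enums):
--     """Compare enum definitions."""
--     results = []
--     old_names = set(old_enums.keys())
--     new_names = set(new_enums.keys())
--
--     added = new_names - old_names
--     removed = old_names - new_names
--     common = old_names & new_names
--
--     if added:
--         results.append(("ADD", f"{len(added)} new enums"))
--         for name in sorted(added):
--             results.append(("INFO", f"  + {name} ({len(new_enums[name]['values'])} values)"))
--
--     if removed:
--         results.append(("DEL", f"{len(removed)} removed enums"))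
--         for name in sorted(removed):
--             results.append(("INFO", f"  - {name}"))
--
--     for name in sorted(common):
--         old_vals = old_enums[name]["values"]
--         new_vals = new_enums[name]["values"]
--
--         added_v = set(new_vals.keys()) - set(old_vals.keys())
--         removed_v = set(old_vals.keys()) - set(new_vals.keys())
--         changed_v = {k for k in set(old_vals.keys()) & set(new_vals.keys())
--                      if old_vals[k] != new_vals[k]}
--
--         if added_v or removed_v or changed_v:
--             results.append(("CHG", f"{name}: "
--                            f"+{len(added_v)} -{len(removed_v)} ~{len(changed_v)} values"))
--             for v in sorted(added_v):
--                 results.append(("INFO", f"  + {v} = {new_vals[v]}"))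
--             for v in sorted(removed_v):
--                 results.append(("INFO", f"  - {v} = {old_vals[v]}"))
--             for v in sorted(changed_v):
--                 results.append(("CRIT", f"  ~ {v}: {old_vals[v]} -> {new_vals[v]}"))
--
--     return results
-- ===== SOURCE B (Python) =====
-- def _merge3(xs, ys):
--     """Sort-merge join of two sorted, duplicate-free key lists:
--     returns (only-in-xs, only-in-ys, in-both), each in sorted order."""
--     only_x, only_y, both = [], [], []
--     i = j = 0
--     while i < len(xs) and j < len(ys):
--         if xs[i] < ys[j]:
--             only_x.append(xs[i]); i += 1
--         elif ys[j] < xs[i]: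
--             only_y.append(ys[j]); j += 1
--         else:
--             both.append(xs[i]); i += 1; j += 1
--     only_x.extend(xs[i:])
--     only_y.extend(ys[j:])
--     return only_x, only_y, both
--
--
-- def diff_enums(old_enums, new_enums):
--     """Compare enum definitions."""
--     results = []
--     removed, added, common = _merge3(sorted(old_enums), sorted(new_enums))
--
--     if added:
--         results.append(("ADD", f"{len(added)} new enums"))
--         for name in added:
--             results.append(("INFO", f"  + {name} ({len(new_enums[name]['values'])} values)"))
--
--     if removed:
--         results.append(("DEL", f"{len(removed)} removed enums"))
--         for name in removed:
--             results.append(("INFO", f"  - {name}"))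
--
--     for name in common:
--         old_vals = old_enums[name]["values"]
--         new_vals = new_enums[name]["values"]
--
--         removed_v, added_v, common_v = _merge3(sorted(old_vals), sorted(new_vals))
--         changed_v = [k for k in common_v if old_vals[k] != new_vals[k]]
--
--         if added_v or removed_v or changed_v:
--             results.append(("CHG", f"{name}: "
--                            f"+{len(added_v)} -{len(removed_v)} ~{len(changed_v)} values"))
--             for v in added_v:
--                 results.append(("INFO", f"  + {v} = {new_vals[v]}"))
--             for v in removed_v:
--                 results.append(("INFO", f"  - {v} = {old_vals[v]}"))
--             for v in changed_v:
--                 results.append(("CRIT", f"  ~ {v}: {old_vals[v]} -> {new_vals[v]}"))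
--
--     return results
-- ===== Notes on version B (the rewrite author's own statement) =====
-- stated objective: alternative
-- what changed: Replaces A's hash-set difference/intersection computations (at both the enum-name level and the per-enum value level) with a sort-merge join: the two key lists are sorted once and a single two-pointer merge classifies every key as old-only, new-only or common by order comparisons, with no set objects or membership tests; the already-sorted buckets are emitted directly.
import Mathlib
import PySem

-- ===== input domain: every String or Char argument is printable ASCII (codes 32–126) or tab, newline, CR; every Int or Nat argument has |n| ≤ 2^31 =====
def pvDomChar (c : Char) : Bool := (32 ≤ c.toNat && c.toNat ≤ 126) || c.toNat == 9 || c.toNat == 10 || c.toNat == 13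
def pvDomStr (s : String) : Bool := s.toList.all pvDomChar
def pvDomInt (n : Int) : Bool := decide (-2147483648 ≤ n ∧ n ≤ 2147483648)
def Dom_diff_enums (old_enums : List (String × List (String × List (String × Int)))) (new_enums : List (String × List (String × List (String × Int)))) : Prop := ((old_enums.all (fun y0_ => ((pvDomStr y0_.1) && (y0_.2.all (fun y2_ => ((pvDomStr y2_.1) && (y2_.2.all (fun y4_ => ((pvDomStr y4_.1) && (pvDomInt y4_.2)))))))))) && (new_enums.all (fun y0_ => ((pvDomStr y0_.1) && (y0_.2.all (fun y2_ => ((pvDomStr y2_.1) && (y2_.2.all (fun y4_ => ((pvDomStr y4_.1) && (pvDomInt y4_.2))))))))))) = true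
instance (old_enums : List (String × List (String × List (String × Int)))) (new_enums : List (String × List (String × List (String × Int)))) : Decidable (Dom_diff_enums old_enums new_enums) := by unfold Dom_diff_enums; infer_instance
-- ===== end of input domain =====

-- B replaces A's hash-set differences/intersections by a sort-merge join: one two-pointer merge of the
-- two sorted key lists classifies every key (at both the enum-name and value level); objective: alternative.

-- shared input interpretation: the Python arguments are dicts name -> {"values": {value -> int}}
def pvEnumDict (xs : List (String × List (String × List (String × Int)))) :
    PySem.Dict String (PySem.Dict String (PySem.Dict String Int)) :=
  PySem.Dict.ofList (xs.map (fun p => (p.1, PySem.Dict.ofList (p.2.map (fun q => (q.1, PySem.Dict.ofList q.2))))))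

def pvValuesOf (d : PySem.Dict String (PySem.Dict String (PySem.Dict String Int))) (name : String) :
    PySem.Dict String Int :=
  (d.getD name PySem.Dict.empty).getD "values" PySem.Dict.empty

-- ===== PORT A =====
def diff_enums (old_enums : List (String × List (String × List (String × Int)))) (new_enums : List (String × List (String × List (String × Int)))) : List (String × String) :=
  let od := pvEnumDict old_enums
  let nd := pvEnumDict new_enums
  let old_names : PySem.Set String := PySem.Set.ofList od.keys
  let new_names : PySem.Set String := PySem.Set.ofList nd.keys
  let added : PySem.Set String := PySem.Set.diff new_names old_names
  let removed : PySem.Set String := PySem.Set.diff old_names new_names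
  let common : PySem.Set String := PySem.Set.inter old_names new_names
  let r1 : List (String × String) :=
    if added ≠ [] then
      ("ADD", PySem.Int.toStr (added.length : Int) ++ " new enums") ::
      (PySem.List.sorted added (fun x => x) false).map (fun name =>
        ("INFO", "  + " ++ name ++ " (" ++ PySem.Int.toStr ((pvValuesOf nd name).size : Int) ++ " values)"))
    else []
  let r2 : List (String × String) :=
    if removed ≠ [] then
      ("DEL", PySem.Int.toStr (removed.length : Int) ++ " removed enums") ::
      (PySem.List.sorted removed (fun x => x) false).map (fun name => ("INFO", "  - " ++ name))
    else []
  let r3 : List (String × String) :=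
    (PySem.List.sorted common (fun x => x) false).foldl (fun acc name =>
      let old_vals := pvValuesOf od name
      let new_vals := pvValuesOf nd name
      let added_v : PySem.Set String :=
        PySem.Set.diff (PySem.Set.ofList new_vals.keys) (PySem.Set.ofList old_vals.keys)
      let removed_v : PySem.Set String :=
        PySem.Set.diff (PySem.Set.ofList old_vals.keys) (PySem.Set.ofList new_vals.keys)
      let changed_v : PySem.Set String :=
        (PySem.Set.inter (PySem.Set.ofList old_vals.keys) (PySem.Set.ofList new_vals.keys)).filter
          (fun k => old_vals.getD k 0 != new_vals.getD k 0)
      if added_v ≠ [] ∨ removed_v ≠ [] ∨ changed_v ≠ [] then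
        acc ++ ("CHG", name ++ ": +" ++ PySem.Int.toStr (added_v.length : Int) ++ " -" ++
                  PySem.Int.toStr (removed_v.length : Int) ++ " ~" ++
                  PySem.Int.toStr (changed_v.length : Int) ++ " values") ::
          ((PySem.List.sorted added_v (fun x => x) false).map (fun v =>
              ("INFO", "  + " ++ v ++ " = " ++ PySem.Int.toStr (new_vals.getD v 0))) ++
           (PySem.List.sorted removed_v (fun x => x) false).map (fun v =>
              ("INFO", "  - " ++ v ++ " = " ++ PySem.Int.toStr (old_vals.getD v 0))) ++
           (PySem.List.sorted changed_v (fun x => x) false).map (fun v =>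
              ("CRIT", "  ~ " ++ v ++ ": " ++ PySem.Int.toStr (old_vals.getD v 0) ++ " -> " ++
                        PySem.Int.toStr (new_vals.getD v 0))))
      else acc) []
  r1 ++ r2 ++ r3

-- ===== PORT B =====
-- _merge3: two-pointer sort-merge join of two sorted duplicate-free key lists
def pvMerge3 : List String → List String → List String × List String × List String
  | [], ys => ([], ys, [])
  | x :: xs, [] => (x :: xs, [], [])
  | x :: xs, y :: ys =>
    if x < y then
      (x :: (pvMerge3 xs (y :: ys)).1, (pvMerge3 xs (y :: ys)).2.1, (pvMerge3 xs (y :: ys)).2.2)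
    else if y < x then
      ((pvMerge3 (x :: xs) ys).1, y :: (pvMerge3 (x :: xs) ys).2.1, (pvMerge3 (x :: xs) ys).2.2)
    else
      ((pvMerge3 xs ys).1, (pvMerge3 xs ys).2.1, x :: (pvMerge3 xs ys).2.2)
termination_by xs ys => xs.length + ys.length
decreasing_by all_goals (simp; try omega)

def diff_enums_alt (old_enums : List (String × List (String × List (String × Int)))) (new_enums : List (String × List (String × List (String × Int)))) : List (String × String) :=
  let od := pvEnumDict old_enums
  let nd := pvEnumDict new_enums
  let m := pvMerge3 (PySem.List.sorted od.keys (fun x => x) false)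
                    (PySem.List.sorted nd.keys (fun x => x) false)
  let removed := m.1
  let added := m.2.1
  let common := m.2.2
  let r1 : List (String × String) :=
    if added ≠ [] then
      ("ADD", PySem.Int.toStr (added.length : Int) ++ " new enums") ::
      added.map (fun name =>
        ("INFO", "  + " ++ name ++ " (" ++ PySem.Int.toStr ((pvValuesOf nd name).size : Int) ++ " values)"))
    else []
  let r2 : List (String × String) :=
    if removed ≠ [] then
      ("DEL", PySem.Int.toStr (removed.length : Int) ++ " removed enums") ::
      removed.map (fun name => ("INFO", "  - " ++ name))
    else []
  let r3 : List (String × String) :=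
    common.foldl (fun acc name =>
      let old_vals := pvValuesOf od name
      let new_vals := pvValuesOf nd name
      let mv := pvMerge3 (PySem.List.sorted old_vals.keys (fun x => x) false)
                         (PySem.List.sorted new_vals.keys (fun x => x) false)
      let removed_v := mv.1
      let added_v := mv.2.1
      let changed_v := mv.2.2.filter (fun k => old_vals.getD k 0 != new_vals.getD k 0)
      if added_v ≠ [] ∨ removed_v ≠ [] ∨ changed_v ≠ [] then
        acc ++ ("CHG", name ++ ": +" ++ PySem.Int.toStr (added_v.length : Int) ++ " -" ++
                  PySem.Int.toStr (removed_v.length : Int) ++ " ~" ++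
                  PySem.Int.toStr (changed_v.length : Int) ++ " values") ::
          (added_v.map (fun v =>
              ("INFO", "  + " ++ v ++ " = " ++ PySem.Int.toStr (new_vals.getD v 0))) ++
           removed_v.map (fun v =>
              ("INFO", "  - " ++ v ++ " = " ++ PySem.Int.toStr (old_vals.getD v 0))) ++
           changed_v.map (fun v =>
              ("CRIT", "  ~ " ++ v ++ ": " ++ PySem.Int.toStr (old_vals.getD v 0) ++ " -> " ++
                        PySem.Int.toStr (new_vals.getD v 0))))
      else acc) []
  r1 ++ r2 ++ r3

-- ===== PRECONDITION & SPEC =====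
-- Pre_ excludes exactly the inputs on which the Python raises KeyError: an enum dict whose
-- ["values"] entry is accessed (every new enum; every old enum whose name also occurs in new)
-- but is missing.
def Pre_diff_enums (old_enums : List (String × List (String × List (String × Int)))) (new_enums : List (String × List (String × List (String × Int)))) : Prop :=
  (∀ n ∈ (pvEnumDict new_enums).keys,
      ((pvEnumDict new_enums).getD n PySem.Dict.empty).contains "values" = true) ∧
  (∀ n ∈ (pvEnumDict old_enums).keys, (pvEnumDict new_enums).contains n = true →
      ((pvEnumDict old_enums).getD n PySem.Dict.empty).contains "values" = true)
instance (old_enums : List (String × List (String × List (String × Int)))) (new_enums : List (String × List (String × List (String × Int)))) : Decidable (Pre_diff_enums old_enums new_enums) := by unfold Pre_diff_enums; infer_instance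

def pvWitness_diff_enums : (List (String × List (String × List (String × Int)))) × (List (String × List (String × List (String × Int)))) :=
  ([("Color", [("values", [("RED", 1), ("BLUE", 2)])]), ("Gone", [])],
   [("Color", [("values", [("RED", 1), ("BLUE", 3), ("GREEN", 4)])]), ("New", [("values", [("A", 0)])])])

def Spec_diff_enums (old_enums : List (String × List (String × List (String × Int)))) (new_enums : List (String × List (String × List (String × Int)))) (out : List (String × String)) : Prop := out = diff_enums_alt old_enums new_enums
instance (old_enums : List (String × List (String × List (String × Int)))) (new_enums : List (String × List (String × List (String × Int)))) (out : List (String × String)) : Decidable (Spec_diff_enums old_enums new_enums out) := by unfold Spec_diff_enums; infer_instance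

-- ===== CLAIM (what is proved, stated in full; the proofs are below) =====
def Claim_equal_diff_enums : Prop := ∀ (old_enums : List (String × List (String × List (String × Int)))) (new_enums : List (String × List (String × List (String × Int)))), Dom_diff_enums old_enums new_enums → Pre_diff_enums old_enums new_enums → Spec_diff_enums old_enums new_enums (diff_enums old_enums new_enums)

-- ===== LEMMAS AND PROOFS =====

-- sorted over a nodup sub-collection = filter of the sorted ambient nodup list
theorem pv_sorted_eq_filter (u t : List String) (hu : u.Nodup) (ht : t.Nodup) (p : String → Bool)
    (hmem : ∀ x, x ∈ t ↔ (x ∈ u ∧ p x = true)) :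
    PySem.List.sorted t (fun x => x) false = (PySem.List.sorted u (fun x => x) false).filter p := by
  have hsu : (PySem.List.sorted u (fun x => x) false).Nodup :=
    ((PySem.List.sorted_perm u (fun x => x) false).symm).nodup hu
  apply PySem.List.sorted_eq_of_perm_of_pairwise_lt
  · rw [List.perm_ext_iff_of_nodup (hsu.filter p) ht]
    intro x
    simp only [List.mem_filter, PySem.List.mem_sorted]
    exact (hmem x).symm
  · have hle : (PySem.List.sorted u (fun x => x) false).Pairwise (fun a b => a ≤ b) :=
      PySem.List.sorted_pairwise u (fun x => x)
    have hlt : (PySem.List.sorted u (fun x => x) false).Pairwise (fun a b => a < b) := by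
      have := hle.and hsu
      exact this.imp (fun h => lt_of_le_of_ne h.1 h.2)
    exact hlt.sublist List.filter_sublist

-- sorted of a nodup list is strictly increasing
theorem pv_sorted_lt (u : List String) (hu : u.Nodup) :
    (PySem.List.sorted u (fun x => x) false).Pairwise (· < ·) := by
  have hsu : (PySem.List.sorted u (fun x => x) false).Nodup :=
    ((PySem.List.sorted_perm u (fun x => x) false).symm).nodup hu
  have hle : (PySem.List.sorted u (fun x => x) false).Pairwise (fun a b => a ≤ b) :=
    PySem.List.sorted_pairwise u (fun x => x)
  exact (hle.and hsu).imp (fun h => lt_of_le_of_ne h.1 h.2)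

-- the merge join equals the three membership filters (on strictly sorted inputs)
theorem pvMerge3_filter (xs ys : List String)
    (hx : xs.Pairwise (· < ·)) (hy : ys.Pairwise (· < ·)) :
    pvMerge3 xs ys = (xs.filter (fun x => !ys.contains x),
                      ys.filter (fun y => !xs.contains y),
                      xs.filter (fun x => ys.contains x)) := by
  induction xs, ys using pvMerge3.induct with
  | case1 ys => simp [pvMerge3]
  | case2 x xs => simp [pvMerge3]
  | case3 x xs y ys hxy ih =>
    have hx1 : ∀ z ∈ xs, x < z := fun z hz => (List.pairwise_cons.mp hx).1 z hz
    have hy1 : ∀ z ∈ ys, y < z := fun z hz => (List.pairwise_cons.mp hy).1 z hz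
    have hxs := (List.pairwise_cons.mp hx).2
    have h1 : ¬ x = y := ne_of_lt hxy
    have h2 : x ∉ ys := fun hz => lt_irrefl x (hxy.trans (hy1 _ hz))
    have hne : ∀ z ∈ y :: ys, ¬ z = x := by
      intro z hz
      rcases List.mem_cons.mp hz with rfl | hz'
      · exact fun h => lt_irrefl x (h ▸ hxy)
      · exact fun h => lt_irrefl x (h ▸ (hxy.trans (hy1 _ hz')))
    rw [pvMerge3, if_pos hxy, ih hxs hy]
    refine Prod.ext ?_ (Prod.ext ?_ ?_) <;> dsimp only
    · rw [List.filter_cons_of_pos (by simp [h1, h2])]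
    · exact List.filter_congr (fun z hz => by simp [hne z hz])
    · rw [List.filter_cons_of_neg (by simp [h1, h2])]
  | case4 x xs y ys hxy hyx ih =>
    have hx1 : ∀ z ∈ xs, x < z := fun z hz => (List.pairwise_cons.mp hx).1 z hz
    have hys := (List.pairwise_cons.mp hy).2
    have h1 : ¬ y = x := ne_of_lt hyx
    have h2 : y ∉ xs := fun hz => lt_irrefl y (hyx.trans (hx1 _ hz))
    have hne : ∀ z ∈ x :: xs, ¬ z = y := by
      intro z hz
      rcases List.mem_cons.mp hz with rfl | hz'
      · exact fun h => lt_irrefl y (h ▸ hyx)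
      · exact fun h => lt_irrefl y (h ▸ (hyx.trans (hx1 _ hz')))
    rw [pvMerge3, if_neg hxy, if_pos hyx, ih hx hys]
    refine Prod.ext ?_ (Prod.ext ?_ ?_) <;> dsimp only
    · exact List.filter_congr (fun z hz => by simp [hne z hz])
    · rw [List.filter_cons_of_pos (by simp [h1, h2])]
    · exact List.filter_congr (fun z hz => by simp [hne z hz])
  | case5 x xs y ys hxy hyx ih =>
    have heq : x = y := le_antisymm (not_lt.mp hyx) (not_lt.mp hxy)
    subst heq
    have hx1 : ∀ z ∈ xs, x < z := fun z hz => (List.pairwise_cons.mp hx).1 z hz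
    have hy1 : ∀ z ∈ ys, x < z := fun z hz => (List.pairwise_cons.mp hy).1 z hz
    have hxs := (List.pairwise_cons.mp hx).2
    have hys := (List.pairwise_cons.mp hy).2
    have hnex : ∀ z ∈ xs, ¬ z = x := fun z hz h => lt_irrefl x (h ▸ hx1 z hz)
    have hney : ∀ z ∈ ys, ¬ z = x := fun z hz h => lt_irrefl x (h ▸ hy1 z hz)
    rw [pvMerge3, if_neg hxy, if_neg hyx, ih hxs hys]
    refine Prod.ext ?_ (Prod.ext ?_ ?_) <;> dsimp only
    · rw [List.filter_cons_of_neg (by simp)]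
      exact List.filter_congr (fun z hz => by simp [hnex z hz])
    · rw [List.filter_cons_of_neg (by simp)]
      exact List.filter_congr (fun z hz => by simp [hney z hz])
    · rw [List.filter_cons_of_pos (by simp)]
      exact congrArg (x :: ·) (List.filter_congr (fun z hz => by simp [hnex z hz]))

-- the merge join of the sorted key lists of two dicts = A's three sorted set operations
theorem pv_merge3_dict {A B : Type} (dx : PySem.Dict String A) (dy : PySem.Dict String B)
    (hx : dx.keys.Nodup) (hy : dy.keys.Nodup) :
    pvMerge3 (PySem.List.sorted dx.keys (fun x => x) false)
             (PySem.List.sorted dy.keys (fun x => x) false)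
      = (PySem.List.sorted (PySem.Set.diff (PySem.Set.ofList dx.keys) (PySem.Set.ofList dy.keys)) (fun x => x) false,
         PySem.List.sorted (PySem.Set.diff (PySem.Set.ofList dy.keys) (PySem.Set.ofList dx.keys)) (fun x => x) false,
         PySem.List.sorted (PySem.Set.inter (PySem.Set.ofList dx.keys) (PySem.Set.ofList dy.keys)) (fun x => x) false) := by
  rw [pvMerge3_filter _ _ (pv_sorted_lt _ hx) (pv_sorted_lt _ hy)]
  refine congrArg₂ _ ?_ (congrArg₂ _ ?_ ?_)
  · refine (pv_sorted_eq_filter _ _ hx (PySem.Set.nodup_diff _ _ (PySem.Set.nodup_ofList _)) _ ?_).symm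
    intro x
    simp [PySem.Set.mem_diff, PySem.Set.mem_ofList, PySem.List.mem_sorted, List.contains_eq_mem]
  · refine (pv_sorted_eq_filter _ _ hy (PySem.Set.nodup_diff _ _ (PySem.Set.nodup_ofList _)) _ ?_).symm
    intro x
    simp [PySem.Set.mem_diff, PySem.Set.mem_ofList, PySem.List.mem_sorted, List.contains_eq_mem]
  · refine (pv_sorted_eq_filter _ _ hx (PySem.Set.nodup_inter _ _ (PySem.Set.nodup_ofList _)) _ ?_).symm
    intro x
    simp [PySem.Set.mem_inter, PySem.Set.mem_ofList, PySem.List.mem_sorted, List.contains_eq_mem]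

-- sorting a filtered nodup list = filtering the sorted list
theorem pv_sorted_filter (s : List String) (hs : s.Nodup) (p : String → Bool) :
    PySem.List.sorted (s.filter p) (fun x => x) false
      = (PySem.List.sorted s (fun x => x) false).filter p := by
  apply pv_sorted_eq_filter _ _ hs (hs.filter p)
  intro x; simp [List.mem_filter]

-- getD yields a stored value or the default
theorem pv_getD_mem_or {κ ν : Type} [BEq κ] [LawfulBEq κ] (d : PySem.Dict κ ν) (k : κ) (d0 : ν) :
    d.getD k d0 ∈ d.values ∨ d.getD k d0 = d0 := by
  rw [PySem.Dict.getD_eq_get?_getD]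
  cases h : d.get? k with
  | none => right; rfl
  | some v =>
    left
    have hv := PySem.Dict.mem_items_of_get?_eq_some _ h
    simp only [PySem.Dict.values, Option.getD_some]
    exact List.mem_map_of_mem hv

-- every value of an ofList dict satisfies any property all listed values satisfy
theorem pv_values_ofList {κ ν : Type} [BEq κ] [LawfulBEq κ] (l : List (κ × ν)) (P : ν → Prop)
    (h : ∀ p ∈ l, P p.2) : ∀ v ∈ (PySem.Dict.ofList l).values, P v := by
  have key : ∀ (l : List (κ × ν)) (d : PySem.Dict κ ν),
      (∀ p ∈ l, P p.2) → (∀ v ∈ d.values, P v) →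
      ∀ v ∈ (l.foldl (fun d p => d.insert p.1 p.2) d).values, P v := by
    intro l
    induction l with
    | nil => intro d _ hd v hv; exact hd v hv
    | cons p t ih =>
      intro d hl hd v hv
      refine ih (d.insert p.1 p.2) (fun q hq => hl q (List.mem_cons_of_mem _ hq)) ?_ v hv
      intro w hw
      rcases PySem.Dict.mem_values_insert _ _ _ _ hw with rfl | hw'
      · exact hl p (List.mem_cons_self)
      · exact hd w hw'
  intro v hv
  refine key l PySem.Dict.empty h ?_ v ?_
  · intro w hw; simp [PySem.Dict.values, PySem.Dict.empty] at hw
  · exact hv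

-- the value dict of any enum in a parsed argument has duplicate-free keys
theorem pv_nodup_pvValues (xs : List (String × List (String × List (String × Int)))) (name : String) :
    (pvValuesOf (pvEnumDict xs) name).keys.Nodup := by
  unfold pvValuesOf pvEnumDict
  rcases pv_getD_mem_or (PySem.Dict.ofList (xs.map (fun p => (p.1, PySem.Dict.ofList (p.2.map (fun q => (q.1, PySem.Dict.ofList q.2))))))) name PySem.Dict.empty with hmem | heq
  · have := pv_values_ofList (xs.map (fun p => (p.1, PySem.Dict.ofList (p.2.map (fun q => (q.1, PySem.Dict.ofList q.2))))))
      (fun v => (v.getD "values" PySem.Dict.empty).keys.Nodup) ?_ _ hmem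
    · exact this
    · intro p hp
      rcases List.mem_map.mp hp with ⟨q, _, rfl⟩
      rcases pv_getD_mem_or (PySem.Dict.ofList (q.2.map (fun r => (r.1, PySem.Dict.ofList r.2)))) "values" PySem.Dict.empty with hmem2 | heq2
      · have := pv_values_ofList (q.2.map (fun r => (r.1, PySem.Dict.ofList r.2)))
          (fun w => w.keys.Nodup) ?_ _ hmem2
        · exact this
        · intro r hr
          rcases List.mem_map.mp hr with ⟨s, _, rfl⟩
          exact PySem.Dict.nodup_keys_ofList _
      · rw [heq2]; exact PySem.Dict.nodup_keys_empty
  · rw [heq]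
    simp only [PySem.Dict.getD_empty]
    exact PySem.Dict.nodup_keys_empty

theorem diff_enums_spec : Claim_equal_diff_enums := by
  intro oldE newE _ _
  unfold Spec_diff_enums diff_enums diff_enums_alt
  simp only [pv_merge3_dict (pvEnumDict oldE) (pvEnumDict newE)
      (PySem.Dict.nodup_keys_ofList _) (PySem.Dict.nodup_keys_ofList _),
    ne_eq, PySem.List.length_sorted, PySem.List.sorted_eq_nil_iff]
  refine congrArg _ (List.foldl_ext _ _ _ (fun acc name _ => ?_))
  have hperm := (PySem.List.sorted_perm (PySem.Set.inter
      (PySem.Set.ofList (pvValuesOf (pvEnumDict oldE) name).keys)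
      (PySem.Set.ofList (pvValuesOf (pvEnumDict newE) name).keys)) (fun x => x) false).filter
    (fun k => (pvValuesOf (pvEnumDict oldE) name).getD k 0 != (pvValuesOf (pvEnumDict newE) name).getD k 0)
  have hnil : (List.filter
      (fun k => (pvValuesOf (pvEnumDict oldE) name).getD k 0 != (pvValuesOf (pvEnumDict newE) name).getD k 0)
      (PySem.List.sorted (PySem.Set.inter
        (PySem.Set.ofList (pvValuesOf (pvEnumDict oldE) name).keys)
        (PySem.Set.ofList (pvValuesOf (pvEnumDict newE) name).keys)) (fun x => x) false) = [])
      ↔ (List.filter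
      (fun k => (pvValuesOf (pvEnumDict oldE) name).getD k 0 != (pvValuesOf (pvEnumDict newE) name).getD k 0)
      (PySem.Set.inter (PySem.Set.ofList (pvValuesOf (pvEnumDict oldE) name).keys)
        (PySem.Set.ofList (pvValuesOf (pvEnumDict newE) name).keys)) = []) := by
    rw [← List.length_eq_zero_iff, ← List.length_eq_zero_iff, hperm.length_eq]
  simp only [pv_merge3_dict (pvValuesOf (pvEnumDict oldE) name) (pvValuesOf (pvEnumDict newE) name)
      (pv_nodup_pvValues oldE name) (pv_nodup_pvValues newE name),
    pv_sorted_filter (PySem.Set.inter (PySem.Set.ofList (pvValuesOf (pvEnumDict oldE) name).keys)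
        (PySem.Set.ofList (pvValuesOf (pvEnumDict newE) name).keys))
      (PySem.Set.nodup_inter _ _ (PySem.Set.nodup_ofList _)),
    PySem.List.length_sorted, PySem.List.sorted_eq_nil_iff, hperm.length_eq, hnil]
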